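-- pv_equiv track=rewrite | github.com/tu4k0/DL-Cryptography-Course | Practice4/key_standard/FIPS140_3.py | series_length_test
-- ===== SOURCE A (Python) =====
-- def series_length_test(bits):
--     counter = 0
--     series_1_length = {'1': 0, '2': 0, '3': 0, '4': 0, '5': 0, '6': 0}
--     series_0_length = {'1': 0, '2': 0, '3': 0, '4': 0, '5': 0, '6': 0}
--     for i in range(len(bits)):
--         if i == len(bits) - 1:
--             break
--         elif bits[i] == '0' and bits[i+1] == '1':
--             while bits[i+1] != '0':
--                 counter += 1
--                 i += 1
--                 if i + 1 == len(bits):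
--                     break
--             if counter > 6:
--                 series_1_length['6'] += 1
--             else:
--                 series_1_length[str(counter)] += 1
--             counter = 0
--         else:
--             pass
--     for i in range(len(bits)):
--         if i == len(bits) - 1:
--             break
--         elif bits[i] == '1' and bits[i+1] == '0':
--             while bits[i+1] != '1':
--                 counter += 1
--                 i += 1
--                 if i + 1 == len(bits):
--                     break
--             if counter > 6:
--                 series_0_length['6'] += 1
--             else:
--                 series_0_length[str(counter)] += 1
--             counter = 0
--         else:
--             pass
--     if 2267 < series_1_length['1'] < 2733 and 1079 < series_1_length['2'] < 1421 and 502 < series_1_length['3'] < 748 and 223 < series_1_length['4'] < 402 and 90 < series_1_length['5'] < 223 and 90 < series_1_length['6'] < 223: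
--         if 2267 < series_0_length['1'] < 2733 and 1079 < series_0_length['2'] < 1421 and 502 < series_0_length['3'] < 748 and 223 < series_0_length['4'] < 402 and 90 < series_0_length['5'] < 223 and 90 < series_0_length['6'] < 223:
--             status = True
--         else:
--             status = False
--     else:
--         status = False
--
--     return status
-- ===== SOURCE B (Python) =====
-- def series_length_test(bits):
--     series_1_length = {str(k): 0 for k in range(1, 7)}
--     series_0_length = {str(k): 0 for k in range(1, 7)}
--
--     def tally(buckets, sep, starter):
--         # single streaming pass: run > 0 while inside a run being counted
--         run = 0
--         prev_sep = False
--         for c in bits: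
--             if c == sep:
--                 if run:
--                     buckets[str(min(run, 6))] += 1
--                 run = 0
--                 prev_sep = True
--             else:
--                 if run:
--                     run += 1
--                 elif prev_sep and c == starter:
--                     run = 1
--                 prev_sep = False
--         if run:
--             buckets[str(min(run, 6))] += 1
--
--     tally(series_1_length, '0', '1')
--     tally(series_0_length, '1', '0')
--
--     def ok(d):
--         return (2267 < d['1'] < 2733 and 1079 < d['2'] < 1421
--                 and 502 < d['3'] < 748 and 223 < d['4'] < 402
--                 and 90 < d['5'] < 223 and 90 < d['6'] < 223)
--
--     return ok(series_1_length) and ok(series_0_length)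
-- ===== Notes on version B (the rewrite author's own statement) =====
-- stated objective: simpler
-- what changed: Replaced A's two index loops with inner while-rescans and manual break/counter bookkeeping by a single streaming run-length state machine per separator (run counter + prev_sep flag, flush on separator or at end).
import Mathlib
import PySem

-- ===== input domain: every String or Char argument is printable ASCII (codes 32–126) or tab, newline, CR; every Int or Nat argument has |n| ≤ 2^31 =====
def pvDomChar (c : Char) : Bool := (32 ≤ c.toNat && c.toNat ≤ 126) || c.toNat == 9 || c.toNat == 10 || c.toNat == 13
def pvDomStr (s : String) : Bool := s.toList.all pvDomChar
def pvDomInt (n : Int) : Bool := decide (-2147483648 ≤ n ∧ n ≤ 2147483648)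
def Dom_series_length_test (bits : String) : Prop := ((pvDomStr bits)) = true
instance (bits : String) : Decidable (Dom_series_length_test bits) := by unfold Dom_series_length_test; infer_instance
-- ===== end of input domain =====

-- B replaces A's index loops with inner while-rescans by a single streaming run-length
-- state machine per separator (objective: simpler); return values proved equal on all inputs.


-- ===== PORT A =====
-- the inner 'while bits[i+1] != sep: counter += 1; i += 1; if i+1 == len(bits): break'.
-- The final 'else counter' arm is Python's while-condition test; the outer dite guard is
-- only needed for Lean totality (Python enters the loop with i+1 < len and the break
-- fires before i+1 ever reaches len, so the index read is always in range).
def slWhile (l : List Char) (sep : Char) (i : Nat) (counter : Int) : Int :=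
  if h : i + 1 < l.length then
    if l[i + 1] ≠ sep then
      if i + 2 = l.length then counter + 1
      else slWhile l sep (i + 1) (counter + 1)
    else counter
  else counter
termination_by l.length - i
decreasing_by omega

-- 'if counter > 6: d["6"] += 1 else: d[str(counter)] += 1' ; the key is always present
-- (counter is 1..6 in the else branch), so modify with default 0 is exact.
def slBump (d : PySem.Dict String Int) (counter : Int) : PySem.Dict String Int :=
  if counter > 6 then d.modify "6" 0 (· + 1)
  else d.modify (PySem.Int.toStr counter) 0 (· + 1)

-- one of A's two identical outer for-loops; 'break' at i == len-1 only skips that last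
-- iteration (it is the final index of range(len)), so it is the guard 'if i = len-1 then d'.
-- List.getD is exact here: every index read is < l.length under the guard.
def slLoop (l : List Char) (sep starter : Char) (d : PySem.Dict String Int) :
    PySem.Dict String Int :=
  (List.range l.length).foldl
    (fun d i =>
      if i = l.length - 1 then d
      else if l.getD i ' ' = sep ∧ l.getD (i + 1) ' ' = starter then
        slBump d (slWhile l sep i 0)
      else d) d

def slInit : PySem.Dict String Int :=
  PySem.Dict.ofList [("1", 0), ("2", 0), ("3", 0), ("4", 0), ("5", 0), ("6", 0)]

def slOkA (d : PySem.Dict String Int) : Bool :=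
  decide (2267 < d.getD "1" 0) && decide (d.getD "1" 0 < 2733) &&
  decide (1079 < d.getD "2" 0) && decide (d.getD "2" 0 < 1421) &&
  decide (502 < d.getD "3" 0) && decide (d.getD "3" 0 < 748) &&
  decide (223 < d.getD "4" 0) && decide (d.getD "4" 0 < 402) &&
  decide (90 < d.getD "5" 0) && decide (d.getD "5" 0 < 223) &&
  decide (90 < d.getD "6" 0) && decide (d.getD "6" 0 < 223)

def series_length_test (bits : String) : Bool :=
  if slOkA (slLoop bits.toList '0' '1' slInit) then
    (if slOkA (slLoop bits.toList '1' '0' slInit) then true else false)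
  else false

-- ===== PORT B =====
-- 'buckets[str(min(run, 6))] += 1' (key always present: run ≥ 1 when flushed)
def slBumpB (d : PySem.Dict String Int) (run : Int) : PySem.Dict String Int :=
  d.modify (PySem.Int.toStr (min run 6)) 0 (· + 1)

-- the body of B's for loop over the characters; state (buckets, run, prev_sep)
def slStep (sep starter : Char) (st : PySem.Dict String Int × Int × Bool) (c : Char) :
    PySem.Dict String Int × Int × Bool :=
  let (d, run, prevSep) := st
  if c = sep then
    ((if run ≠ 0 then slBumpB d run else d), 0, true)
  else
    (d, (if run ≠ 0 then run + 1 else if prevSep = true ∧ c = starter then 1 else run), false)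

-- the trailing 'if run: buckets[str(min(run,6))] += 1' after the loop
def slFinish (st : PySem.Dict String Int × Int × Bool) : PySem.Dict String Int :=
  if st.2.1 ≠ 0 then slBumpB st.1 st.2.1 else st.1

def slTally (l : List Char) (sep starter : Char) (d : PySem.Dict String Int) :
    PySem.Dict String Int :=
  slFinish (l.foldl (slStep sep starter) (d, 0, false))

def slOkB (d : PySem.Dict String Int) : Bool :=
  decide (2267 < d.getD "1" 0) && decide (d.getD "1" 0 < 2733) &&
  decide (1079 < d.getD "2" 0) && decide (d.getD "2" 0 < 1421) &&
  decide (502 < d.getD "3" 0) && decide (d.getD "3" 0 < 748) &&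
  decide (223 < d.getD "4" 0) && decide (d.getD "4" 0 < 402) &&
  decide (90 < d.getD "5" 0) && decide (d.getD "5" 0 < 223) &&
  decide (90 < d.getD "6" 0) && decide (d.getD "6" 0 < 223)

def series_length_test_alt (bits : String) : Bool :=
  slOkB (slTally bits.toList '0' '1' slInit) && slOkB (slTally bits.toList '1' '0' slInit)

-- ===== PRECONDITION & SPEC =====
def Spec_series_length_test (bits : String) (out : Bool) : Prop := out = series_length_test_alt bits
instance (bits : String) (out : Bool) : Decidable (Spec_series_length_test bits out) := by unfold Spec_series_length_test; infer_instance

-- ===== CLAIM (what is proved, stated in full; the proofs are below) =====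
def Claim_equal_series_length_test : Prop := ∀ (bits : String), Dom_series_length_test bits → Spec_series_length_test bits (series_length_test bits)

-- ===== LEMMAS AND PROOFS =====

-- length of the leading run of characters ≠ sep
def twc (sep : Char) (l : List Char) : Int :=
  ((l.takeWhile (fun c => decide (c ≠ sep))).length : Int)

-- common event list: the successive counter values both programs bucket, scanning with
-- ps = "previous character was sep"
def ev (sep starter : Char) : Bool → List Char → List Int
  | _, [] => []
  | ps, c :: r =>
    if ps = true ∧ c = starter then twc sep (c :: r) :: ev sep starter (decide (c = sep)) r
    else ev sep starter (decide (c = sep)) r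

lemma slWhile_eq (l : List Char) (sep : Char) :
    ∀ k i counter, l.length - i ≤ k →
      slWhile l sep i counter = counter + twc sep (l.drop (i + 1)) := by
  intro k
  induction k with
  | zero =>
    intro i counter h
    rw [slWhile]
    have hge : l.length ≤ i := by omega
    rw [List.drop_eq_nil_of_le (by omega)]
    simp [twc, dif_neg (by omega : ¬ i + 1 < l.length)]
  | succ k ih =>
    intro i counter h
    rw [slWhile]
    by_cases h1 : i + 1 < l.length
    · rw [List.drop_eq_getElem_cons h1]
      by_cases h2 : l[i + 1] = sep
      · simp [dif_pos h1, h2, twc]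
      · simp only [dif_pos h1, if_pos h2, twc, List.takeWhile_cons,
          decide_eq_true_eq]
        by_cases h3 : i + 2 = l.length
        · rw [if_pos h3, List.drop_eq_nil_of_le (by omega)]
          simp
        · rw [if_neg h3, ih (i + 1) (counter + 1) (by omega)]
          simp [twc]
          ring
    · rw [List.drop_eq_nil_of_le (by omega)]
      simp [twc, dif_neg h1]

lemma slLoop_range' (l : List Char) (sep starter : Char) :
    ∀ m j d, j + m + 1 = l.length →
      (List.range' j m).foldl
        (fun d i =>
          if i = l.length - 1 then d
          else if l.getD i ' ' = sep ∧ l.getD (i + 1) ' ' = starter then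
            slBump d (slWhile l sep i 0)
          else d) d
      = (ev sep starter (decide (l.getD j ' ' = sep)) (l.drop (j + 1))).foldl slBump d := by
  intro m
  induction m with
  | zero =>
    intro j d hj
    rw [List.drop_eq_nil_of_le (by omega)]
    simp [ev]
  | succ m ih =>
    intro j d hj
    have hj1 : j + 1 < l.length := by omega
    have hdrop : l.drop (j + 1) = l[j + 1] :: l.drop (j + 2) := List.drop_eq_getElem_cons hj1
    have hget : l.getD (j + 1) ' ' = l[j + 1] := List.getD_eq_getElem l ' ' hj1
    have e2 : j + 1 + 1 = j + 2 := by omega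
    rw [List.range'_succ, List.foldl_cons]
    rw [if_neg (by omega : ¬ j = l.length - 1)]
    by_cases htr : l.getD j ' ' = sep ∧ l.getD (j + 1) ' ' = starter
    · rw [if_pos htr]
      have hst : l[j + 1] = starter := hget.symm.trans htr.2
      have hcnt : slWhile l sep j 0 = twc sep (l.drop (j + 1)) := by
        rw [slWhile_eq l sep (l.length - j) j 0 (by omega)]; ring
      rw [ih (j + 1) (slBump d (slWhile l sep j 0)) (by omega),
        decide_eq_true htr.1, hdrop]
      have hev : ev sep starter true (l[j + 1] :: l.drop (j + 2))
          = twc sep (l[j + 1] :: l.drop (j + 2))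
            :: ev sep starter (decide (l[j + 1] = sep)) (l.drop (j + 2)) := by
        simp [ev, hst]
      rw [hev, List.foldl_cons, e2, hcnt, hdrop, hget]
    · rw [if_neg htr, ih (j + 1) d (by omega), hdrop, e2]
      have hnev : ev sep starter (decide (l.getD j ' ' = sep)) (l[j + 1] :: l.drop (j + 2))
          = ev sep starter (decide (l[j + 1] = sep)) (l.drop (j + 2)) := by
        by_cases hps : l.getD j ' ' = sep
        · have hst : ¬ l[j + 1] = starter := fun hc => htr ⟨hps, hget.trans hc⟩
          rw [decide_eq_true hps]
          simp [ev, hst]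
        · rw [decide_eq_false hps]
          simp [ev]
      rw [hnev, hget]

lemma slLoop_eq_ev (l : List Char) (sep starter : Char) (d : PySem.Dict String Int) :
    slLoop l sep starter d = (ev sep starter false l).foldl slBump d := by
  cases l with
  | nil => simp [slLoop, ev]
  | cons c r =>
    unfold slLoop
    have hsplit : List.range (c :: r).length = List.range r.length ++ [r.length] := by
      simp [List.range_succ]
    rw [hsplit, List.foldl_append]
    simp only [List.foldl_cons, List.foldl_nil]
    rw [if_pos (by simp : r.length = (c :: r).length - 1)]
    rw [List.range_eq_range', slLoop_range' (c :: r) sep starter r.length 0 d (by simp)]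
    simp [ev]

-- B's fold equals the bucket fold over the event list of the state machine
def F (sep starter : Char) : Int → Bool → List Char → List Int
  | run, _, [] => if run ≠ 0 then [run] else []
  | run, ps, c :: l =>
    if c = sep then
      (if run ≠ 0 then run :: F sep starter 0 true l else F sep starter 0 true l)
    else
      F sep starter (if run ≠ 0 then run + 1 else if ps = true ∧ c = starter then 1 else run)
        false l

lemma slFold_eq_F (sep starter : Char) :
    ∀ (l : List Char) (d : PySem.Dict String Int) (run : Int) (ps : Bool),
      slFinish (l.foldl (slStep sep starter) (d, run, ps))
        = (F sep starter run ps l).foldl slBumpB d := by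
  intro l
  induction l with
  | nil =>
    intro d run ps
    by_cases h : run = 0 <;> simp [slFinish, F, h]
  | cons c l ih =>
    intro d run ps
    rw [List.foldl_cons, F]
    by_cases hc : c = sep
    · by_cases hr : run = 0 <;>
        simp [slStep, hc, hr, ih, List.foldl_cons]
    · simp [slStep, hc, ih]

lemma F_eq_ev (sep starter : Char) (hss : starter ≠ sep) :
    ∀ l : List Char,
      (∀ ps, F sep starter 0 ps l = ev sep starter ps l) ∧
      (∀ r : Int, 1 ≤ r → F sep starter r false l = (r + twc sep l) :: ev sep starter false l) := by
  intro l
  induction l with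
  | nil =>
    constructor
    · intro ps; simp [F, ev]
    · intro r hr; simp [F, ev, twc, show r ≠ 0 by omega]
  | cons c l ih =>
    constructor
    · intro ps
      by_cases hc : c = sep
      · simp [F, ev, hc, Ne.symm hss, ih.1]
      · by_cases hev : ps = true ∧ c = starter
        · obtain ⟨hps, rfl⟩ := hev
          have htw : twc sep (c :: l) = 1 + twc sep l := by
            simp [twc, hc]; ring
          simp [F, ev, hc, htw, hps, ih.2 1 le_rfl]
        · simp [F, ev, hc, hev, ih.1]
    · intro r hr
      by_cases hc : c = sep
      · subst hc
        have htw : twc c (c :: l) = 0 := by simp [twc]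
        simp [F, ev, show r ≠ 0 by omega, Ne.symm hss, htw, ih.1]
      · have htw : twc sep (c :: l) = 1 + twc sep l := by
          simp [twc, hc]; ring
        have h2 := ih.2 (r + 1) (by omega)
        simp [F, ev, show r ≠ 0 by omega, hc, htw, h2]
        try omega

lemma slTally_eq_ev (l : List Char) (sep starter : Char) (hss : starter ≠ sep)
    (d : PySem.Dict String Int) :
    slTally l sep starter d = (ev sep starter false l).foldl slBumpB d := by
  rw [slTally, slFold_eq_F, (F_eq_ev sep starter hss l).1 false]

lemma slBump_eq_slBumpB : slBump = slBumpB := by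
  funext d c
  by_cases h : c > 6
  · have : min c 6 = 6 := by omega
    simp [slBump, slBumpB, h, this]
    rfl
  · have : min c 6 = c := by omega
    simp [slBump, slBumpB, h, this]

-- ===== VERDICT (by name: the statement is the Claim_ definition above) =====
theorem series_length_test_spec : Claim_equal_series_length_test := by
  intro bits _
  unfold Spec_series_length_test series_length_test series_length_test_alt
  rw [slLoop_eq_ev, slLoop_eq_ev, slTally_eq_ev _ _ _ (by decide),
    slTally_eq_ev _ _ _ (by decide), slBump_eq_slBumpB]
  have hok : slOkA = slOkB := rfl
  rw [hok]
  by_cases h1 : slOkB ((ev '0' '1' false bits.toList).foldl slBumpB slInit) <;>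
    by_cases h0 : slOkB ((ev '1' '0' false bits.toList).foldl slBumpB slInit) <;>
      simp [h1, h0]
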